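-- pv_equiv track=rewrite | github.com/mithrantir/CodinGame | practice/puzzles/medium/Anagrams.py | reverse_phase_1
-- ===== SOURCE A (Python) =====
-- alpha = "ABCDEFGHIJKLMNOPQRSTUVWXYZ"
--
-- def reverse_phase_1(phrase):
--     phrase_list, hold_let, hold_ind = [c for c in phrase], [], []
--     for i in range(len(phrase_list)):
--         if phrase_list[i].isalpha() and alpha.index(phrase_list[i]) % 2 == 1:
--             hold_ind.append(i)
--             hold_let.append(phrase_list[i])
--
--     if len(hold_let) > 1:
--         hold_let_shift = list(reversed(hold_let))
--         for i in range(len(hold_ind)):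
--             phrase_list[hold_ind[i]] = hold_let_shift[i]
--     return "".join(c for c in phrase_list)
-- ===== SOURCE B (Python) =====
-- alpha = "ABCDEFGHIJKLMNOPQRSTUVWXYZ"
--
-- def reverse_phase_1(phrase):
--     def odd(c):
--         return c.isalpha() and alpha.index(c) % 2 == 1
--     rev = list(reversed([c for c in phrase if odd(c)]))
--     out = []
--     for c in phrase:
--         out.append(rev.pop(0) if odd(c) else c)
--     return "".join(out)
-- ===== Notes on version B (the rewrite author's own statement) =====
-- stated objective: simpler
-- what changed: Instead of collecting parallel index/letter lists, making a reversed copy and writing it back into a mutable character list, B filters the qualifying letters once, reverses them, and streams through the phrase consuming that reversed stack with pop(0) wherever a qualifying letter sits - no index bookkeeping, no in-place writeback, no special case for fewer than two letters.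
import Mathlib
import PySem

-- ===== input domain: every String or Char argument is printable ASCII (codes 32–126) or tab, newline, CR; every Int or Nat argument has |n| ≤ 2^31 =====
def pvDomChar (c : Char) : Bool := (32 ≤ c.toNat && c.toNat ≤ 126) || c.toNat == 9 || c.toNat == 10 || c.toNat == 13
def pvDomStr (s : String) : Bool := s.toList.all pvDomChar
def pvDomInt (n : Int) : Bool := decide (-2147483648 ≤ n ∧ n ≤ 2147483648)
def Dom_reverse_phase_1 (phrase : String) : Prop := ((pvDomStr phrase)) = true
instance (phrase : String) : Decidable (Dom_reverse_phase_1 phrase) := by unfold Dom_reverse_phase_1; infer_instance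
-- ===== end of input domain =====

-- B replaces A's parallel index/letter lists, reversed copy and in-place writeback by a single
-- filtered reversed stack consumed in one pass (objective: simpler). Same ValueError on lowercase
-- letters (alpha.index), so Pre_ excludes phrases containing a lowercase letter.

-- ===== PORT A =====
def pvAlpha : List Char := "ABCDEFGHIJKLMNOPQRSTUVWXYZ".toList

-- c.isalpha() and alpha.index(c) % 2 == 1.  alpha.index raises ValueError on letters not in
-- alpha (lowercase); those inputs are outside Pre_, so the `.getD 0` default is never reached.
def pvOdd (c : Char) : Bool :=
  PySem.Chars.isalpha c && ((PySem.List.index? pvAlpha c).getD 0) % 2 == 1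

def reverse_phase_1 (phrase : String) : String :=
  let phrase_list := phrase.toList
  let hi_hl := (PySem.List.pyRange 0 (PySem.List.len phrase_list) 1).foldl
      (fun (s : List Int × List Char) i =>
        if pvOdd (PySem.List.pyGetD phrase_list i ' ') then
          (s.1 ++ [i], s.2 ++ [PySem.List.pyGetD phrase_list i ' '])
        else s) ([], [])
  let hold_ind := hi_hl.1
  let hold_let := hi_hl.2
  let phrase_list2 :=
    if hold_let.length > 1 then
      let hold_let_shift := hold_let.reverse
      (PySem.List.pyRange 0 (PySem.List.len hold_ind) 1).foldl
        (fun pl i =>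
          PySem.List.pySetD pl (PySem.List.pyGetD hold_ind i 0)
            (PySem.List.pyGetD hold_let_shift i ' ')) phrase_list
    else phrase_list
  String.ofList phrase_list2

-- ===== PORT B =====
-- rev.pop(0): under Pre_ rev is nonempty at every qualifying step (it holds exactly the
-- remaining qualifying letters), so the headD default is never reached.
def pvAltLoop : List Char → List Char → List Char
  | [], _ => []
  | c :: cs, rev =>
    if pvOdd c then rev.headD c :: pvAltLoop cs rev.tail
    else c :: pvAltLoop cs rev

def reverse_phase_1_alt (phrase : String) : String :=
  let rev := (phrase.toList.filter pvOdd).reverse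
  String.ofList (pvAltLoop phrase.toList rev)

-- ===== PRECONDITION & SPEC =====
-- Pre_ excludes phrases containing a lowercase ASCII letter: there `alpha.index` raises
-- ValueError in both A and B (A returns nothing on such inputs).
def Pre_reverse_phase_1 (phrase : String) : Prop :=
  (phrase.toList.all (fun c => !PySem.Chars.islower c)) = true
instance (phrase : String) : Decidable (Pre_reverse_phase_1 phrase) := by
  unfold Pre_reverse_phase_1; infer_instance

def pvWitness_reverse_phase_1 : String := "HELLO, WORLD!"

def Spec_reverse_phase_1 (phrase : String) (out : String) : Prop := out = reverse_phase_1_alt phrase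
instance (phrase : String) (out : String) : Decidable (Spec_reverse_phase_1 phrase out) := by unfold Spec_reverse_phase_1; infer_instance

-- ===== CLAIM (what is proved, stated in full; the proofs are below) =====
def Claim_equal_reverse_phase_1 : Prop := ∀ (phrase : String), Dom_reverse_phase_1 phrase → Pre_reverse_phase_1 phrase → Spec_reverse_phase_1 phrase (reverse_phase_1 phrase)

-- ===== LEMMAS AND PROOFS =====

-- qualifying positions of l, with their letters, as Python's enumerate sees them
def pvPairs (l : List Char) : List (Int × Char) :=
  (PySem.List.enumerate l 0).filter (fun p => pvOdd p.2)

-- A's second loop as a fold over (index, new letter) pairs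
def pvWrites (pl : List Char) (W : List (Int × Char)) : List Char :=
  W.foldl (fun s p => PySem.List.pySetD s p.1 p.2) pl

theorem pv_enumerate_shift {α : Type} (l : List α) (a : Int) :
    PySem.List.enumerate l (a + 1) =
      (PySem.List.enumerate l a).map (fun p => (p.1 + 1, p.2)) := by
  induction l generalizing a with
  | nil => rfl
  | cons x xs ih => simp [PySem.List.enumerate_cons, ih]

theorem pv_enumerate_getElem {α : Type} (l : List α) (a : Int) (j : Nat) (h : j < l.length)
    (h' : j < (PySem.List.enumerate l a).length) :
    (PySem.List.enumerate l a)[j] = (a + j, l[j]) := by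
  induction l generalizing a j with
  | nil => simp at h
  | cons x xs ih =>
    cases j with
    | zero => simp [PySem.List.enumerate_cons]
    | succ k =>
      simp only [PySem.List.enumerate_cons, List.getElem_cons_succ]
      rw [ih _ _ (by simpa using h) (by simp only [PySem.List.length_enumerate]; simpa using h)]
      have : a + 1 + (k:Int) = a + ((k:Nat)+1 : Nat) := by push_cast; ring
      rw [this]

theorem pv_enumerate_fst_ge {α : Type} (l : List α) (a : Int) :
    ∀ p ∈ PySem.List.enumerate l a, a ≤ p.1 := by
  induction l generalizing a with
  | nil => intro p hp; simp [PySem.List.enumerate] at hp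
  | cons x xs ih =>
    intro p hp
    rw [PySem.List.enumerate_cons, List.mem_cons] at hp
    rcases hp with h | h
    · simp [h]
    · have := ih (a+1) p h; omega

-- A's first loop computes the qualifying (index, letter) pairs
theorem pv_loop1 (l : List Char) :
    (PySem.List.pyRange 0 (PySem.List.len l) 1).foldl
      (fun (s : List Int × List Char) i =>
        if pvOdd (PySem.List.pyGetD l i ' ') then
          (s.1 ++ [i], s.2 ++ [PySem.List.pyGetD l i ' '])
        else s) ([], []) =
      ((pvPairs l).map Prod.fst, (pvPairs l).map Prod.snd) := by
  have hlenE : (PySem.List.enumerate l 0).length = l.length := PySem.List.length_enumerate l 0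
  have step1 : (PySem.List.pyRange 0 (PySem.List.len l) 1).foldl
      (fun (s : List Int × List Char) i =>
        if pvOdd (PySem.List.pyGetD l i ' ') then
          (s.1 ++ [i], s.2 ++ [PySem.List.pyGetD l i ' '])
        else s) ([], []) =
      (PySem.List.pyRange 0 (PySem.List.len (PySem.List.enumerate l 0)) 1).foldl
      (fun (s : List Int × List Char) i =>
        (fun (s : List Int × List Char) (p : Int × Char) =>
          (if pvOdd p.2 then s.1 ++ [p.1] else s.1,
           if pvOdd p.2 then s.2 ++ [p.2] else s.2)) s
          (PySem.List.pyGetD (PySem.List.enumerate l 0) i ((0:Int), ' '))) ([], []) := by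
    have hlen : PySem.List.len l = PySem.List.len (PySem.List.enumerate l 0) := by
      simp [PySem.List.len, hlenE]
    rw [← hlen]
    apply PySem.List.foldl_congr_mem
    intro acc i hi
    rcases PySem.List.mem_pyRange_one.1 hi with ⟨h0, h1⟩
    have hil : i < (l.length : Int) := by simpa [PySem.List.len] using h1
    have hiE : i < ((PySem.List.enumerate l 0).length : Int) := by omega
    rw [PySem.List.pyGetD_eq_getElem l ' ' h0 hil,
        PySem.List.pyGetD_eq_getElem _ _ h0 hiE,
        pv_enumerate_getElem l 0 i.toNat (by omega) (by omega)]
    have : ((0:Int) + (i.toNat : Int)) = i := by omega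
    rw [this]
    by_cases h : pvOdd l[i.toNat] = true <;> simp [h]
  rw [step1, PySem.List.foldl_pyRange_zero_pyGetD (PySem.List.enumerate l 0) ((0:Int),' ')
      (fun (s : List Int × List Char) (p : Int × Char) =>
          (if pvOdd p.2 then s.1 ++ [p.1] else s.1,
           if pvOdd p.2 then s.2 ++ [p.2] else s.2)) ([], []),
     PySem.List.foldl_prod_mk (fun (s1 : List Int) (p : Int × Char) => if pvOdd p.2 then s1 ++ [p.1] else s1)
       (fun (s2 : List Char) (p : Int × Char) => if pvOdd p.2 then s2 ++ [p.2] else s2)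
       (PySem.List.enumerate l 0) [] []]
  unfold pvPairs
  rw [show (fun (s : List Int) (p : Int × Char) => if pvOdd p.2 then s ++ [p.1] else s)
      = (fun (s : List Int) (p : Int × Char) => if (fun q : Int × Char => pvOdd q.2) p then s ++ [Prod.fst p] else s) from rfl,
     PySem.List.foldl_append_if]
  rw [show (fun (s : List Char) (p : Int × Char) => if pvOdd p.2 then s ++ [p.2] else s)
      = (fun (s : List Char) (p : Int × Char) => if (fun q : Int × Char => pvOdd q.2) p then s ++ [Prod.snd p] else s) from rfl,
     PySem.List.foldl_append_if]
  simp

theorem pv_snd_pairs (l : List Char) :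
    (pvPairs l).map Prod.snd = l.filter pvOdd := by
  unfold pvPairs
  conv_rhs => rw [← PySem.List.map_snd_enumerate l 0]
  rw [List.filter_map]
  rfl

-- consuming the letters in their own order reproduces the list
theorem pv_altLoop_id (l : List Char) : pvAltLoop l (l.filter pvOdd) = l := by
  induction l with
  | nil => rfl
  | cons c cs ih =>
    by_cases h : pvOdd c = true
    · simp [pvAltLoop, h, ih]
    · simp [pvAltLoop, h, ih]

theorem pv_writes_shift (x : Char) (s : List Char) (W : List (Int × Char))
    (h : ∀ p ∈ W, 0 ≤ p.1) :
    pvWrites (x :: s) (W.map (fun p => (p.1 + 1, p.2))) = x :: pvWrites s W := by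
  induction W generalizing s with
  | nil => rfl
  | cons p W ih =>
    have hp : 0 ≤ p.1 := h p (by simp)
    have hset : PySem.List.pySetD (x :: s) (p.1 + 1) p.2 = x :: PySem.List.pySetD s p.1 p.2 := by
      rw [PySem.List.pySetD_of_nonneg _ _ (by omega), PySem.List.pySetD_of_nonneg _ _ hp]
      have : (p.1 + 1).toNat = p.1.toNat + 1 := by omega
      rw [this]; rfl
    simp only [pvWrites, List.map_cons, List.foldl_cons, hset]
    exact ih _ (fun q hq => h q (by simp [hq]))

theorem pv_pairs_cons (c : Char) (cs : List Char) :
    pvPairs (c :: cs) =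
      (if pvOdd c then [((0:Int), c)] else []) ++ (pvPairs cs).map (fun p => (p.1 + 1, p.2)) := by
  unfold pvPairs
  rw [PySem.List.enumerate_cons]
  show List.filter _ ((0, c) :: PySem.List.enumerate cs (0+1)) = _
  rw [pv_enumerate_shift, List.filter_cons, List.filter_map]
  by_cases h : pvOdd c = true <;> simp [h] <;> rfl

theorem pv_zipW_nonneg (cs : List Char) (v : List Char) :
    ∀ p ∈ ((pvPairs cs).map Prod.fst).zip v, 0 ≤ p.1 := by
  rintro ⟨i, x⟩ hp
  have hi : i ∈ (pvPairs cs).map Prod.fst := (List.of_mem_zip hp).1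
  rcases List.mem_map.1 hi with ⟨q, hq, rfl⟩
  exact pv_enumerate_fst_ge cs 0 q (List.mem_filter.1 hq).1

-- the crux: A's writeback at the qualifying indices = B's streaming consumption
theorem pv_main (l : List Char) (v : List Char)
    (hv : v.length = (l.filter pvOdd).length) :
    pvWrites l (((pvPairs l).map Prod.fst).zip v) = pvAltLoop l v := by
  induction l generalizing v with
  | nil => cases v <;> rfl
  | cons c cs ih =>
    have hmap : ((pvPairs cs).map (fun p => (p.1 + 1, p.2))).map Prod.fst
        = ((pvPairs cs).map Prod.fst).map (fun i => i + 1) := by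
      simp [List.map_map]
    by_cases h : pvOdd c = true
    · rw [List.filter_cons_of_pos (by simpa using h)] at hv
      cases v with
      | nil => simp at hv
      | cons v0 v' =>
        rw [pv_pairs_cons]
        simp only [h, if_pos, List.map_cons, List.singleton_append, hmap]
        rw [List.zip_cons_cons, List.zip_map_left]
        have hPmap : List.map (Prod.map (fun i => i + 1) id)
              (((pvPairs cs).map Prod.fst).zip v')
            = (((pvPairs cs).map Prod.fst).zip v').map (fun p => (p.1 + 1, p.2)) := rfl
        show pvWrites (c :: cs) (((0:Int), v0) :: _) = _
        have hset0 : PySem.List.pySetD (c :: cs) (0:Int) v0 = v0 :: cs := by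
          rw [PySem.List.pySetD_of_nonneg _ _ le_rfl]; rfl
        simp only [pvWrites, List.foldl_cons, hset0, hPmap]
        have hws := pv_writes_shift v0 cs (((pvPairs cs).map Prod.fst).zip v')
          (pv_zipW_nonneg cs v')
        simp only [pvWrites] at hws
        rw [hws]
        have ih' := ih v' (by simpa using hv)
        simp only [pvWrites] at ih'
        rw [ih']
        simp [pvAltLoop, h]
    · rw [List.filter_cons_of_neg (by simpa using h)] at hv
      rw [pv_pairs_cons]
      simp only [h, if_neg, List.nil_append, Bool.false_eq_true, not_false_iff, hmap]
      rw [List.zip_map_left]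
      have hPmap : List.map (Prod.map (fun i => i + 1) id)
            (((pvPairs cs).map Prod.fst).zip v)
          = (((pvPairs cs).map Prod.fst).zip v).map (fun p => (p.1 + 1, p.2)) := rfl
      have hws := pv_writes_shift c cs _ (pv_zipW_nonneg cs v)
      simp only [pvWrites] at hws ⊢
      rw [hPmap, hws]
      have ih' := ih v hv
      simp only [pvWrites] at ih'
      rw [ih']
      simp [pvAltLoop, h]

-- A's second loop, as it appears in the port, equals pvWrites over the zipped pairs
theorem pv_loop2 (l : List Char) (v : List Char)
    (hv : v.length = (pvPairs l).length) :
    (PySem.List.pyRange 0 (PySem.List.len ((pvPairs l).map Prod.fst)) 1).foldl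
      (fun pl i =>
        PySem.List.pySetD pl (PySem.List.pyGetD ((pvPairs l).map Prod.fst) i 0)
          (PySem.List.pyGetD v i ' ')) l =
      pvWrites l (((pvPairs l).map Prod.fst).zip v) := by
  set I : List Int := (pvPairs l).map Prod.fst with hI
  set Z : List (Int × Char) := I.zip v with hZ
  have hlenI : I.length = (pvPairs l).length := by simp [hI]
  have hlenZ : Z.length = I.length := by
    simp [hZ, List.length_zip, hlenI, hv]
  have step1 : (PySem.List.pyRange 0 (PySem.List.len I) 1).foldl
      (fun pl i => PySem.List.pySetD pl (PySem.List.pyGetD I i 0) (PySem.List.pyGetD v i ' ')) l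
      = (PySem.List.pyRange 0 (PySem.List.len Z) 1).foldl
      (fun pl i =>
        (fun (pl : List Char) (p : Int × Char) => PySem.List.pySetD pl p.1 p.2) pl
          (PySem.List.pyGetD Z i ((0:Int), ' '))) l := by
    have hlen : PySem.List.len I = PySem.List.len Z := by
      simp [PySem.List.len, hlenZ]
    rw [← hlen]
    apply PySem.List.foldl_congr_mem
    intro acc i hi
    rcases PySem.List.mem_pyRange_one.1 hi with ⟨h0, h1⟩
    have hiI : i < (I.length : Int) := by simpa [PySem.List.len] using h1
    have hiZ : i < (Z.length : Int) := by omega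
    have hiv : i < (v.length : Int) := by
      have : v.length = I.length := by omega
      omega
    rw [PySem.List.pyGetD_eq_getElem I 0 h0 hiI,
        PySem.List.pyGetD_eq_getElem v ' ' h0 hiv,
        PySem.List.pyGetD_eq_getElem Z _ h0 hiZ]
    simp [hZ, List.getElem_zip]
  rw [step1, PySem.List.foldl_pyRange_zero_pyGetD Z ((0:Int),' ')
      (fun (pl : List Char) (p : Int × Char) => PySem.List.pySetD pl p.1 p.2) l]
  rfl

-- ===== VERDICT (by name: the statement is the Claim_ definition above) =====
theorem reverse_phase_1_spec : Claim_equal_reverse_phase_1 := by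
  intro phrase _ _
  unfold Spec_reverse_phase_1 reverse_phase_1 reverse_phase_1_alt
  simp only [pv_loop1, pv_snd_pairs]
  set l := phrase.toList with hl
  by_cases hlen : (l.filter pvOdd).length > 1
  · rw [if_pos (by simpa [pv_snd_pairs] using hlen)]
    have hv : (l.filter pvOdd).reverse.length = (pvPairs l).length := by
      have := pv_snd_pairs l
      have : (pvPairs l).length = (l.filter pvOdd).length := by
        rw [← this]; simp
      simp [this]
    rw [pv_loop2 l ((l.filter pvOdd).reverse) hv,
        pv_main l ((l.filter pvOdd).reverse) (by simp)]
  · rw [if_neg (by simpa [pv_snd_pairs] using hlen)]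
    have hle : (l.filter pvOdd).length ≤ 1 := by omega
    have hsmall : (l.filter pvOdd).reverse = l.filter pvOdd := by
      rcases hfl : l.filter pvOdd with _ | ⟨a, _ | ⟨b, u⟩⟩
      · rfl
      · rfl
      · rw [hfl] at hle; simp at hle
    rw [hsmall, pv_altLoop_id]
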